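-- pv_equiv track=rewrite | github.com/alexandroid000/particle-sim | src/utilities.py | encodeJointState
-- ===== SOURCE A (Python) =====
-- def encodeJointState(states):
--     X = 5 # five options for state
--     joint_state = 0
--     N = len(states)-1
--     for s in states:
--         joint_state += s*(X**N)
--         N = N - 1
--     return joint_state
-- ===== SOURCE B (Python) =====
-- def encodeJointState(states):
--     joint_state = 0
--     for s in states:
--         joint_state = joint_state * 5 + s
--     return joint_state
-- ===== Notes on version B (the rewrite author's own statement) =====
-- stated objective: faster
-- what changed: Replaces the per-element 5**N exponentiation (recomputed from scratch each iteration) with Horner's rule: one multiply-and-add per element.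
import Mathlib
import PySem

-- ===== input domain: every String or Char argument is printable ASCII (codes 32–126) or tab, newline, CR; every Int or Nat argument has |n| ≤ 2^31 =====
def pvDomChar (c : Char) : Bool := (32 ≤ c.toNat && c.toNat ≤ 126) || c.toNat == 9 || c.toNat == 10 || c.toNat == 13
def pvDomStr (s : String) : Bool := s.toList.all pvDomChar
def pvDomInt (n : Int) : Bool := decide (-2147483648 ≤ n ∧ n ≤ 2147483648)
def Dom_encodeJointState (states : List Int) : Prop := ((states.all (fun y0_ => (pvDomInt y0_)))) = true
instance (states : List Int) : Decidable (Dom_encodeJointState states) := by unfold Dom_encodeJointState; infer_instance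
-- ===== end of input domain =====

-- B replaces the per-element 5**N exponentiation with Horner's rule (one multiply-add per element); asymptotically faster.


-- ===== PORT A =====
-- loop state is (joint_state, N); 5 ** N ported as 5 ^ N.toNat, exact since N ≥ 0 at every use (N starts at len-1 and is decremented once per element).
def encodeJointState (states : List Int) : Int :=
  (states.foldl (fun (p : Int × Int) s => (p.1 + s * 5 ^ p.2.toNat, p.2 - 1))
    (0, (states.length : Int) - 1)).1

-- ===== PORT B =====
def encodeJointState_alt (states : List Int) : Int :=
  states.foldl (fun j s => j * 5 + s) 0

-- ===== PRECONDITION & SPEC =====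
def Spec_encodeJointState (states : List Int) (out : Int) : Prop := out = encodeJointState_alt states
instance (states : List Int) (out : Int) : Decidable (Spec_encodeJointState states out) := by unfold Spec_encodeJointState; infer_instance

-- ===== CLAIM (what is proved, stated in full; the proofs are below) =====
def Claim_equal_encodeJointState : Prop := ∀ (states : List Int), Dom_encodeJointState states → Spec_encodeJointState states (encodeJointState states)

-- ===== LEMMAS AND PROOFS =====

-- Horner fold from an arbitrary accumulator.
theorem horner_shift (l : List Int) (a : Int) :
    l.foldl (fun j s => j * 5 + s) a = a * 5 ^ l.length + l.foldl (fun j s => j * 5 + s) 0 := by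
  induction l generalizing a with
  | nil => simp
  | cons s t ih =>
    simp only [List.foldl_cons, List.length_cons]
    rw [ih (a * 5 + s), ih (0 * 5 + s)]
    ring

-- A's fold, started with N = len l - 1, computes j plus the Horner value of l.
theorem afold_eq (l : List Int) (j : Int) :
    (l.foldl (fun (p : Int × Int) s => (p.1 + s * 5 ^ p.2.toNat, p.2 - 1))
      (j, (l.length : Int) - 1)).1 = j + l.foldl (fun j s => j * 5 + s) 0 := by
  induction l generalizing j with
  | nil => simp
  | cons s t ih =>
    simp only [List.foldl_cons, List.length_cons]
    have h1 : ((((t.length : Int) + 1) - 1)).toNat = t.length := by omega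
    have h2 : (((t.length : Int) + 1) - 1) - 1 = (t.length : Int) - 1 := by ring
    push_cast
    rw [h2]
    have := ih (j + s * 5 ^ ((((t.length : Int) + 1) - 1)).toNat)
    rw [this, h1, horner_shift t (0 + s)]
    ring

-- ===== VERDICT (by name: the statement is the Claim_ definition above) =====
theorem encodeJointState_spec : Claim_equal_encodeJointState := by
  intro states _
  unfold Spec_encodeJointState encodeJointState encodeJointState_alt
  rw [afold_eq states 0]
  ring
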